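-- pv_equiv track=rewrite | github.com/tooooooooomy/competition-programming | at-coder-problems/together.py | solve
-- ===== SOURCE A (Python) =====
-- def solve(N, a):
--     d = {}
--     min_x = min(a) - 1
--     max_x = max(a) + 1
--     while min_x <= max_x:
--         d[min_x] = 0
--         min_x += 1
--
--     for i in range(N):
--         d[a[i] - 1] += 1
--         d[a[i]] += 1
--         d[a[i] + 1] += 1
--
--     return max(d.values())
-- ===== SOURCE B (Python) =====
-- def solve(N, a):
--     # Counter over the first N values; any window of width 3 with a positive
--     # count is centered within 1 of some present value, so only centers
--     # v-1, v, v+1 for distinct present v need to be examined.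
--     c = {}
--     for i in range(N):
--         v = a[i]
--         c[v] = c.get(v, 0) + 1
--     best = 0
--     for v in c:
--         for x in (v - 1, v, v + 1):
--             t = c.get(x - 1, 0) + c.get(x, 0) + c.get(x + 1, 0)
--             if t > best:
--                 best = t
--     return best
-- ===== Notes on version B (the rewrite author's own statement) =====
-- stated objective: faster
-- what changed: Instead of materializing a dict entry for every integer in [min(a)-1, max(a)+1] and scattering three increments per element, B builds a Counter of the first N values once and maximizes the 3-window sum only over centers within 1 of a distinct present value, so the value range never appears in the cost.
import Mathlib
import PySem

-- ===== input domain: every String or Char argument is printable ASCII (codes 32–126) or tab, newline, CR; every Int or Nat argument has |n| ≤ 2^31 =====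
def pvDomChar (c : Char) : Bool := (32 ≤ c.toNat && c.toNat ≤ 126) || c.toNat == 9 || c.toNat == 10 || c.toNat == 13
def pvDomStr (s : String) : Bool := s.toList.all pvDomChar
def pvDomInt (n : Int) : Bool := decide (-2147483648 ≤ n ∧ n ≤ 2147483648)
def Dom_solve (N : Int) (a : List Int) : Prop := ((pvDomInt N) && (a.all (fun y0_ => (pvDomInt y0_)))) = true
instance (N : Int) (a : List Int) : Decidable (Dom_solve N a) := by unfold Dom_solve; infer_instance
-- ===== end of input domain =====

-- B replaces A's dict over the whole value range [min(a)-1, max(a)+1] by a counter of the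
-- first N values and maximizes the 3-window sum over centers near present values (objective: faster).

-- ===== PORT A =====
-- the 'while min_x <= max_x: d[min_x] = 0; min_x += 1' loop; it runs exactly (max_x - min_x + 1).toNat times
def solveBuild (fuel : Nat) (k : Int) (d : PySem.Dict Int Int) : PySem.Dict Int Int :=
  match fuel with
  | 0 => d
  | f + 1 => solveBuild f (k + 1) (d.insert k 0)

def solve (N : Int) (a : List Int) : Int :=
  let mn := (PySem.List.min? a (fun x => x)).getD 0 - 1   -- min(a) - 1; exact under Pre_solve (a ≠ [])
  let mx := (PySem.List.max? a (fun x => x)).getD 0 + 1   -- max(a) + 1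
  let d := solveBuild (mx - mn + 1).toNat mn PySem.Dict.empty
  let d := (PySem.List.pyRange 0 N).foldl (fun d i =>
      let v := PySem.List.pyGetD a i 0                    -- a[i]; exact under Pre_solve (0 ≤ i < N ≤ len a)
      let d := d.modify (v - 1) 0 (· + 1)                 -- d[a[i]-1] += 1; key present under Pre_solve
      let d := d.modify v 0 (· + 1)                       -- d[a[i]] += 1
      d.modify (v + 1) 0 (· + 1)) d                       -- d[a[i]+1] += 1
  (PySem.List.max? d.values (fun x => x)).getD 0          -- max(d.values()); d is never empty

-- ===== PORT B =====
def solve_alt (N : Int) (a : List Int) : Int :=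
  let c := (PySem.List.pyRange 0 N).foldl (fun c i =>
      let v := PySem.List.pyGetD a i 0                    -- a[i]; exact under Pre_solve
      c.insert v (c.getD v 0 + 1)) PySem.Dict.empty       -- c[v] = c.get(v, 0) + 1
  c.keys.foldl (fun best v =>
    [v - 1, v, v + 1].foldl (fun best x =>
      let t := c.getD (x - 1) 0 + c.getD x 0 + c.getD (x + 1) 0
      if t > best then t else best) best) 0

-- ===== PRECONDITION & SPEC =====
-- Pre_ excludes exactly where A raises: empty a (ValueError from min/max) and N > len(a) (IndexError at a[i]).
def Pre_solve (N : Int) (a : List Int) : Prop := a ≠ [] ∧ N ≤ (a.length : Int)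
instance (N : Int) (a : List Int) : Decidable (Pre_solve N a) := by unfold Pre_solve; infer_instance
def pvWitness_solve : Int × List Int := (2, [1, 3])

def Spec_solve (N : Int) (a : List Int) (out : Int) : Prop := out = solve_alt N a
instance (N : Int) (a : List Int) (out : Int) : Decidable (Spec_solve N a out) := by unfold Spec_solve; infer_instance

-- ===== CLAIM (what is proved, stated in full; the proofs are below) =====
def Claim_equal_solve : Prop := ∀ (N : Int) (a : List Int), Dom_solve N a → Pre_solve N a → Spec_solve N a (solve N a)

-- ===== LEMMAS AND PROOFS =====

-- count of the first-N prefix in the width-3 window centered at x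
def cnt3 (L : List Int) (x : Int) : Int :=
  (L.count (x - 1) : Int) + (L.count x : Int) + (L.count (x + 1) : Int)

lemma cnt3_nonneg (L : List Int) (x : Int) : 0 ≤ cnt3 L x := by
  unfold cnt3; positivity

lemma pyRange_zero_nonpos {N : Int} (h : N ≤ 0) : PySem.List.pyRange 0 N = [] := by
  apply List.eq_nil_iff_forall_not_mem.mpr
  intro x hx
  rw [PySem.List.mem_pyRange_one] at hx
  omega

-- a 'for i in range(N)' loop reading a[i] is a fold over the first N elements
lemma foldl_range_take {β : Type} (a : List Int) (N : Int) (hN : N ≤ (a.length : Int))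
    (f : β → Int → β) (init : β) :
    (PySem.List.pyRange 0 N).foldl (fun s i => f s (PySem.List.pyGetD a i 0)) init
      = (a.take N.toNat).foldl f init := by
  by_cases h0 : N ≤ 0
  · rw [pyRange_zero_nonpos h0]
    have h1 : N.toNat = 0 := by omega
    simp [h1]
  · have hlen : PySem.List.len (a.take N.toNat) = N := by
      simp [PySem.List.len, List.length_take]; omega
    rw [show PySem.List.pyRange 0 N = PySem.List.pyRange 0 (PySem.List.len (a.take N.toNat)) by rw [hlen]]
    rw [PySem.List.foldl_congr_mem _ _ (fun s i => f s (PySem.List.pyGetD (a.take N.toNat) i 0)) init ?_]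
    · simpa using PySem.List.foldl_pyRange_pyGetD (a.take N.toNat) 0 f init (a := 0) le_rfl
    · intro acc i hi
      rw [PySem.List.mem_pyRange_one] at hi
      have hiN : i < N := by omega
      show f acc (PySem.List.pyGetD a i 0) = f acc (PySem.List.pyGetD (a.take N.toNat) i 0)
      congr 1
      rw [PySem.List.pyGetD_eq_getElem a 0 hi.1 (by omega),
          PySem.List.pyGetD_eq_getElem (a.take N.toNat) 0 hi.1 (by simpa [PySem.List.len] using hi.2)]
      simp [List.getElem_take]

-- one body of A's 'for' loop: the three '+= 1' updates at v-1, v, v+1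
lemma getD_step (d : PySem.Dict Int Int) (v x : Int) :
    (((d.modify (v - 1) 0 (· + 1)).modify v 0 (· + 1)).modify (v + 1) 0 (· + 1)).getD x 0
      = d.getD x 0 + ((if x = v - 1 then 1 else 0) + (if x = v then 1 else 0) + (if x = v + 1 then 1 else 0)) := by
  simp only [PySem.Dict.getD_modify]
  split_ifs <;> subst_vars <;> omega

-- A's increment step
lemma getD_incr3_foldl (L : List Int) (d : PySem.Dict Int Int) (x : Int) :
    (L.foldl (fun d v => ((d.modify (v - 1) 0 (· + 1)).modify v 0 (· + 1)).modify (v + 1) 0 (· + 1)) d).getD x 0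
      = d.getD x 0 + cnt3 L x := by
  induction L generalizing d with
  | nil => simp [cnt3]
  | cons v L ih =>
    rw [List.foldl_cons, ih, getD_step]
    unfold cnt3
    simp only [List.count_cons, beq_iff_eq]
    push_cast
    split_ifs <;> omega

lemma keys_incr3_foldl (L : List Int) (d : PySem.Dict Int Int)
    (h : ∀ v ∈ L, (v - 1) ∈ d.keys ∧ v ∈ d.keys ∧ (v + 1) ∈ d.keys) :
    (L.foldl (fun d v => ((d.modify (v - 1) 0 (· + 1)).modify v 0 (· + 1)).modify (v + 1) 0 (· + 1)) d).keys
      = d.keys := by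
  induction L generalizing d with
  | nil => rfl
  | cons v L ih =>
    rw [List.foldl_cons]
    have hv := h v (List.mem_cons_self)
    have kmod : ∀ (d' : PySem.Dict Int Int) (k : Int), k ∈ d'.keys →
        (d'.modify k 0 (· + 1)).keys = d'.keys := by
      intro d' k hk
      rw [PySem.Dict.keys_modify]
      exact PySem.Dict.keys_insert_of_contains d' _ ((PySem.Dict.contains_iff_mem_keys d' k).mpr hk)
    have k1 := kmod d (v - 1) hv.1
    have k2 := kmod (d.modify (v - 1) 0 (· + 1)) v (by rw [k1]; exact hv.2.1)
    have k3 := kmod ((d.modify (v - 1) 0 (· + 1)).modify v 0 (· + 1)) (v + 1) (by rw [k2, k1]; exact hv.2.2)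
    rw [ih _ (by rw [k3, k2, k1]; exact fun w hw => h w (List.mem_cons_of_mem _ hw)), k3, k2, k1]

lemma solveBuild_items (fuel : Nat) (k : Int) (d : PySem.Dict Int Int)
    (h : ∀ j : Nat, j < fuel → d.contains (k + j) = false) :
    (solveBuild fuel k d).items = d.items ++ (List.range fuel).map (fun j : Nat => (k + (j : Int), (0 : Int))) := by
  induction fuel generalizing k d with
  | zero => simp [solveBuild]
  | succ f ih =>
    have hk : d.contains k = false := by simpa using h 0 (by omega)
    have hrest : ∀ j : Nat, j < f → (d.insert k 0).contains (k + 1 + j) = false := by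
      intro j hj
      rw [PySem.Dict.contains_insert]
      have h1 : (k + 1 + (j : Int)) ≠ k := by omega
      have h2 : d.contains (k + 1 + j) = false := by
        have := h (j + 1) (by omega)
        have he : k + ((j : Nat) + 1 : Nat) = k + 1 + (j : Int) := by push_cast; ring
        rwa [he] at this
      simp [h1, h2]
    show (solveBuild f (k + 1) (d.insert k 0)).items = _
    rw [ih (k + 1) (d.insert k 0) hrest, PySem.Dict.items_insert_of_not_contains d 0 hk]
    rw [List.range_succ_eq_map, List.map_cons, List.map_map]
    simp only [List.append_assoc, List.cons_append, List.nil_append]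
    congr 2
    · simp
    · apply List.map_congr_left
      intro j _
      simp only [Function.comp_apply, Prod.mk.injEq, and_true]
      push_cast
      ring

theorem solve_spec : Claim_equal_solve := by
  intro N a _hdom hpre
  obtain ⟨hne, hNlen⟩ := hpre
  unfold Spec_solve
  -- min and max of a
  obtain ⟨m, hm⟩ : ∃ m, PySem.List.min? a (fun x => x) = some m := by
    cases h : PySem.List.min? a (fun x => x) with
    | none => exact absurd ((PySem.List.min?_eq_none_iff a _).mp h) hne
    | some m => exact ⟨m, rfl⟩
  obtain ⟨M, hM⟩ : ∃ M, PySem.List.max? a (fun x => x) = some M := by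
    cases h : PySem.List.max? a (fun x => x) with
    | none => exact absurd ((PySem.List.max?_eq_none_iff a _).mp h) hne
    | some M => exact ⟨M, rfl⟩
  have hmM : m ≤ M := PySem.List.max?_isMax hM m (PySem.List.min?_mem hm)
  set mn := m - 1 with hmn
  set mx := M + 1 with hmx
  set F := (mx - mn + 1).toNat with hF
  have hFcast : (F : Int) = mx - mn + 1 := by omega
  set L := a.take N.toNat with hL
  have hLmem : ∀ v ∈ L, m ≤ v ∧ v ≤ M := by
    intro v hv
    have hva : v ∈ a := List.take_subset _ _ hv
    exact ⟨PySem.List.min?_isMin hm v hva, PySem.List.max?_isMax hM v hva⟩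
  -- the pre-filled dict
  set d0 := solveBuild F mn PySem.Dict.empty with hd0
  have hitems : d0.items = (List.range F).map (fun j : Nat => (mn + (j : Int), (0 : Int))) := by
    rw [hd0, solveBuild_items F mn PySem.Dict.empty (fun j _ => rfl)]
    simp
    rfl
  have hkeys0 : d0.keys = (List.range F).map (fun j : Nat => mn + (j : Int)) := by
    show d0.items.map Prod.fst = _
    rw [hitems, List.map_map]
    simp [Function.comp]
  have hmemkeys : ∀ x : Int, x ∈ d0.keys ↔ mn ≤ x ∧ x ≤ mx := by
    intro x
    rw [hkeys0]
    simp only [List.mem_map, List.mem_range]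
    constructor
    · rintro ⟨j, hj, rfl⟩; omega
    · rintro ⟨h1, h2⟩; exact ⟨(x - mn).toNat, by omega, by omega⟩
  have hnodup0 : d0.keys.Nodup := by
    rw [hkeys0]
    exact (List.nodup_range).map (fun i j h => by omega)
  have hgetD0 : ∀ x : Int, d0.getD x 0 = 0 := by
    intro x
    by_cases hc : d0.contains x = true
    · have hx := (PySem.Dict.contains_iff_mem_keys d0 x).mp hc
      rw [hkeys0] at hx
      simp only [List.mem_map, List.mem_range] at hx
      obtain ⟨j, hj, rfl⟩ := hx
      have : (mn + (j : Int), (0 : Int)) ∈ d0.items := by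
        rw [hitems]; exact List.mem_map_of_mem (List.mem_range.mpr hj)
      exact PySem.Dict.getD_of_mem_items d0 this hnodup0 0
    · exact PySem.Dict.getD_of_not_contains d0 0 (by simpa using hc)
  -- rewrite solve
  have hAfold :
      solve N a = (PySem.List.max? ((L.foldl (fun d v => ((d.modify (v - 1) 0 (· + 1)).modify v 0 (· + 1)).modify (v + 1) 0 (· + 1)) d0)).values (fun x => x)).getD 0 := by
    simp only [solve]
    rw [hm, hM]
    simp only [Option.getD_some]
    rw [foldl_range_take a N hNlen (fun (d : PySem.Dict Int Int) (v : Int) => ((d.modify (v - 1) 0 (· + 1)).modify v 0 (· + 1)).modify (v + 1) 0 (· + 1)) _]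
  set d1 := L.foldl (fun d v => ((d.modify (v - 1) 0 (· + 1)).modify v 0 (· + 1)).modify (v + 1) 0 (· + 1)) d0 with hd1
  have hwindow : ∀ v ∈ L, (v - 1) ∈ d0.keys ∧ v ∈ d0.keys ∧ (v + 1) ∈ d0.keys := by
    intro v hv
    have := hLmem v hv
    exact ⟨(hmemkeys _).mpr (by omega), (hmemkeys _).mpr (by omega), (hmemkeys _).mpr (by omega)⟩
  have hkeys1 : d1.keys = d0.keys := keys_incr3_foldl L d0 hwindow
  have hgetD1 : ∀ x, d1.getD x 0 = cnt3 L x := by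
    intro x
    rw [hd1, getD_incr3_foldl, hgetD0, zero_add]
  have hvalues : d1.values = d0.keys.map (fun k => cnt3 L k) := by
    rw [PySem.Dict.values_eq_map_keys d1 (by rw [hkeys1]; exact hnodup0) 0, hkeys1]
    exact List.map_congr_left (fun k _ => hgetD1 k)
  -- rewrite solve_alt
  have hc : ((PySem.List.pyRange 0 N).foldl (fun c i =>
        c.insert (PySem.List.pyGetD a i 0) (c.getD (PySem.List.pyGetD a i 0) 0 + 1)) PySem.Dict.empty)
      = PySem.Dict.counter L := by
    rw [foldl_range_take a N hNlen (fun (c : PySem.Dict Int Int) (v : Int) => c.insert v (c.getD v 0 + 1)) _]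
    exact PySem.Dict.foldl_insert_getD_add_one_eq_counter L
  have hBfold : solve_alt N a =
      (PySem.Dict.counter L).keys.foldl (fun best v =>
        [v - 1, v, v + 1].foldl (fun best x =>
          if (PySem.Dict.counter L).getD (x - 1) 0 + (PySem.Dict.counter L).getD x 0 + (PySem.Dict.counter L).getD (x + 1) 0 > best
          then (PySem.Dict.counter L).getD (x - 1) 0 + (PySem.Dict.counter L).getD x 0 + (PySem.Dict.counter L).getD (x + 1) 0
          else best) best) 0 := by
    simp only [solve_alt]
    rw [hc]
  have hcnt : ∀ x : Int, (PySem.Dict.counter L).getD (x - 1) 0 + (PySem.Dict.counter L).getD x 0 + (PySem.Dict.counter L).getD (x + 1) 0 = cnt3 L x := by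
    intro x
    rw [PySem.Dict.getD_counter, PySem.Dict.getD_counter, PySem.Dict.getD_counter]
    rfl
  set cand := (PySem.Dict.counter L).keys.flatMap (fun v => [v - 1, v, v + 1]) with hcand
  have hB : solve_alt N a = (cand.map (cnt3 L)).foldl max 0 := by
    rw [hBfold, List.foldl_map, hcand, List.foldl_flatMap]
    apply PySem.List.foldl_congr_mem
    intro acc v _
    apply PySem.List.foldl_congr_mem
    intro acc' x _
    simp only [hcnt]
    omega
  have hmemcand : ∀ x : Int, x ∈ cand ↔ ∃ v ∈ L, x = v - 1 ∨ x = v ∨ x = v + 1 := by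
    intro x
    rw [hcand]
    simp [List.mem_flatMap, PySem.Dict.keys_counter, PySem.Set.mem_ofList]
  have hcand_sub : ∀ x ∈ cand, x ∈ d0.keys := by
    intro x hx
    obtain ⟨v, hv, hor⟩ := (hmemcand x).mp hx
    have := hLmem v hv
    exact (hmemkeys x).mpr (by omega)
  have hpos_cand : ∀ x : Int, 0 < cnt3 L x → x ∈ cand := by
    intro x hxpos
    unfold cnt3 at hxpos
    have : 0 < L.count (x - 1) ∨ 0 < L.count x ∨ 0 < L.count (x + 1) := by omega
    rcases this with h | h | h
    · exact (hmemcand x).mpr ⟨x - 1, List.count_pos_iff.mp h, by omega⟩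
    · exact (hmemcand x).mpr ⟨x, List.count_pos_iff.mp h, by omega⟩
    · exact (hmemcand x).mpr ⟨x + 1, List.count_pos_iff.mp h, by omega⟩
  -- both sides
  set B := (cand.map (cnt3 L)).foldl max 0 with hBdef
  have hB0 : (0 : Int) ≤ B := (PySem.List.le_foldl_max (cand.map (cnt3 L)) 0).1
  have hBub : ∀ t ∈ cand.map (cnt3 L), t ≤ B := (PySem.List.le_foldl_max (cand.map (cnt3 L)) 0).2
  have hBmem : B = 0 ∨ B ∈ cand.map (cnt3 L) := PySem.List.foldl_max_mem _ 0
  -- A's max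
  have hvne : d1.values ≠ [] := by
    have hFne : F ≠ 0 := by omega
    rw [hvalues, hkeys0]
    simp [List.map_eq_nil_iff, List.range_eq_nil, hFne]
  obtain ⟨mval, hmval⟩ : ∃ w, PySem.List.max? d1.values (fun x => x) = some w := by
    cases h : PySem.List.max? d1.values (fun x => x) with
    | none => exact absurd ((PySem.List.max?_eq_none_iff _ _).mp h) hvne
    | some w => exact ⟨w, rfl⟩
  have hA : solve N a = mval := by rw [hAfold, hmval]; rfl
  have hmval_mem : mval ∈ d1.values := PySem.List.max?_mem hmval
  have hmval_ub : ∀ y ∈ d1.values, y ≤ mval := fun y hy => PySem.List.max?_isMax hmval y hy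
  -- A ≤ B
  have hAB : mval ≤ B := by
    rw [hvalues] at hmval_mem
    obtain ⟨x, hx, rfl⟩ := List.mem_map.mp hmval_mem
    by_cases hp : 0 < cnt3 L x
    · exact hBub _ (List.mem_map_of_mem (hpos_cand x hp))
    · omega
  -- B ≤ A
  have hBA : B ≤ mval := by
    rcases hBmem with h0 | hmem
    · rw [hvalues] at hmval_mem
      obtain ⟨x, _, rfl⟩ := List.mem_map.mp hmval_mem
      have := cnt3_nonneg L x
      omega
    · obtain ⟨x, hx, hxB⟩ := List.mem_map.mp hmem
      rw [← hxB]
      apply hmval_ub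
      rw [hvalues]
      exact List.mem_map_of_mem (hcand_sub x hx)
  rw [hA, hB]
  omega

-- ===== VERDICT =====
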